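-- pv_equiv track=rewrite | github.com/NightCatrin/autotest_course | homework4/task_with_star.py | max_division_by_3
-- ===== SOURCE A (Python) =====
-- def max_division_by_3(num):
--
--     array_num = [int(a) for a in str(num)]
--     y = array_num.copy()
--     index = 0
--     new_array = []
--     new_num = ''
--
--     for i in range(len(array_num)):
--         while array_num[i] < 10:
--             num_sum = sum(array_num)
--             if num_sum % 3 == 0:
--                 new_array.append(array_num.copy())
--                 array_num[index] += 1
--             else:
--                 array_num[index] += 1
--         array_num[index] = y[index]
--         index += 1
--
--     max_array = max(new_array)
--
--     for i in max_array:
--         new_num += str(i)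
--
--     return int(new_num)
-- ===== SOURCE B (Python) =====
-- def max_division_by_3(num):
--     digits = [int(a) for a in str(num)]
--     s0 = sum(digits)
--     for i, d in enumerate(digits):
--         r = (d - s0) % 3
--         v = 9 - (9 - r) % 3  # largest value <= 9 congruent to r modulo 3
--         if v > d:
--             return int(''.join(map(str, digits[:i] + [v] + digits[i + 1:])))
--     if s0 % 3 == 0:
--         return int(''.join(map(str, digits)))
--     raise ValueError('no single digit can be increased to make the sum divisible by 3')
-- ===== Notes on version B (the rewrite author's own statement) =====
-- stated objective: alternative
-- what changed: A enumerates every single-position digit raise, re-summing the whole digit list for each candidate and taking max() over all collected variants; B computes the digit sum once and does one left-to-right scan, deriving each position's largest admissible digit from a residue formula and stopping at the first position that can be strictly increased; Pre_ excludes negative inputs and the no-solution inputs, where both programs raise ValueError.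
import Mathlib
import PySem

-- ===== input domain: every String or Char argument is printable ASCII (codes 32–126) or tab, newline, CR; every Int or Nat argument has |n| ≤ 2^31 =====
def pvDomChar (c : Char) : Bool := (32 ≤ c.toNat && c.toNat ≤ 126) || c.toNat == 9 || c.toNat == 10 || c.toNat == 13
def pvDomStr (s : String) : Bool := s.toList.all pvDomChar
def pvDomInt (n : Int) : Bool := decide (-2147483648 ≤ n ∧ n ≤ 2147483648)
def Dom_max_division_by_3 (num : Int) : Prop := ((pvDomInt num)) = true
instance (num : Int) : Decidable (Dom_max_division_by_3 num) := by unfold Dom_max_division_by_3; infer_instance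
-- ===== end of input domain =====

-- B replaces A's brute-force enumeration of all single-digit raises (re-summing the whole
-- list each step, then max over all collected variants) by one left-to-right scan that
-- computes, from the digit sum, the largest admissible value per position and stops at the
-- first strictly increasable one (objective: alternative; asymptotically lighter, though not
-- measurably faster on the bounded inputs a timing run can generate).

-- ===== PORT A =====
-- inner while loop: 'while array_num[i] < 10: … append copy if sum%3==0 … array_num[i] += 1';
-- the 'i < cur.length' guard only makes the recursion total (i ranges over range(len), so it always holds)
def pvAWhile (i : Nat) (cur : List Int) (acc : List (List Int)) : List (List Int) :=
  if hi : i < cur.length then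
    if hv : PySem.List.pyGetD cur (i : Int) 0 < 10 then
      pvAWhile i (PySem.List.pySetD cur (i : Int) (PySem.List.pyGetD cur (i : Int) 0 + 1))
        (if PySem.Int.mod cur.sum 3 = 0 then acc ++ [cur] else acc)
    else acc
  else acc
termination_by (10 - PySem.List.pyGetD cur (i : Int) 0).toNat
decreasing_by
  simp only [PySem.List.pyGetD_natCast, PySem.List.pySetD_natCast] at hv ⊢
  have h1 : (cur.set i (cur.getD i 0 + 1)).getD i 0 = cur.getD i 0 + 1 := by
    rw [List.getD_eq_getElem _ _ (by simpa using hi)]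
    exact List.getElem_set_self _
  have h2 : cur.getD i 0 = cur[i] := List.getD_eq_getElem _ _ hi
  omega

-- A: collect, for each position, every raised-digit variant whose digit sum is divisible by 3
-- (the restore 'array_num[index] = y[index]' is the fresh 'arrayNum' passed at each index);
-- max(new_array) = PySem.List.max? with the identity key; max([]) raises ValueError (→ Pre_).
def max_division_by_3 (num : Int) : Int :=
  let arrayNum := (PySem.Int.toStr num).toList.map (fun a => (PySem.Int.ofChars? [a]).getD 0)
  let newArray := (List.range arrayNum.length).foldl (fun acc i => pvAWhile i arrayNum acc) []
  match PySem.List.max? newArray (fun x => x) with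
  | some maxArray => (PySem.Int.ofStr? (maxArray.foldl (fun s d => s ++ PySem.Int.toStr d) "")).getD 0
  | none => 0  -- Python: max([]) raises ValueError; excluded by Pre_

-- ===== PORT B =====
-- 'for i, d in enumerate(digits): r = (d-s0)%3; v = 9-(9-r)%3; if v > d: return …'
def pvBLoop (digits : List Int) (s0 : Int) : List (Int × Int) → Option (List Int)
  | [] => none
  | (i, d) :: rest =>
      let r := PySem.Int.mod (d - s0) 3
      let v := 9 - PySem.Int.mod (9 - r) 3
      if d < v then
        some (PySem.List.slice digits none (some i) ++ [v] ++ PySem.List.slice digits (some (i + 1)) none)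
      else pvBLoop digits s0 rest

def max_division_by_3_alt (num : Int) : Int :=
  let digits := (PySem.Int.toStr num).toList.map (fun a => (PySem.Int.ofChars? [a]).getD 0)
  let s0 := digits.sum
  match pvBLoop digits s0 (PySem.List.enumerate digits) with
  | some best => (PySem.Int.ofStr? (PySem.Str.join "" (best.map PySem.Int.toStr))).getD 0
  | none =>
      if PySem.Int.mod s0 3 = 0 then
        (PySem.Int.ofStr? (PySem.Str.join "" (digits.map PySem.Int.toStr))).getD 0
      else 0  -- Python: B raises ValueError here; excluded by Pre_

-- ===== PRECONDITION & SPEC =====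
-- Pre_ excludes exactly the inputs where the Python programs raise ValueError: negative num
-- (int('-') fails) and numbers whose digit sum is not divisible by 3 while no digit can be
-- raised to fix it (every digit is 8 or 9, and 8 only helps when the sum is ≡ 2 mod 3):
-- there A's max([]) raises and B raises its own ValueError.
def Pre_max_division_by_3 (num : Int) : Prop :=
  0 ≤ num ∧
  (let ds := (PySem.Int.toChars num).map (fun a => (PySem.Int.ofChars? [a]).getD 0)
   PySem.Int.mod ds.sum 3 = 0 ∨ ∃ d ∈ ds, d ≤ 7 ∨ (d = 8 ∧ PySem.Int.mod ds.sum 3 = 2))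
instance (num : Int) : Decidable (Pre_max_division_by_3 num) := by unfold Pre_max_division_by_3; infer_instance
def pvWitness_max_division_by_3 : Int := 10

def Spec_max_division_by_3 (num : Int) (out : Int) : Prop := out = max_division_by_3_alt num
instance (num : Int) (out : Int) : Decidable (Spec_max_division_by_3 num out) := by unfold Spec_max_division_by_3; infer_instance

-- ===== CLAIM (what is proved, stated in full; the proofs are below) =====
def Claim_equal_max_division_by_3 : Prop := ∀ (num : Int), Dom_max_division_by_3 num → Pre_max_division_by_3 num → Spec_max_division_by_3 num (max_division_by_3 num)

-- ===== LEMMAS AND PROOFS =====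

-- B's per-position candidate: the largest value ≤ 9 congruent to (d - s0) mod 3
def pvVm (d s0 : Int) : Int := 9 - PySem.Int.mod (9 - PySem.Int.mod (d - s0) 3) 3

lemma pvVm_bounds (d s0 : Int) :
    7 ≤ pvVm d s0 ∧ pvVm d s0 ≤ 9 ∧ PySem.Int.mod (s0 - d + pvVm d s0) 3 = 0 := by
  unfold pvVm
  simp only [PySem.Int.mod_eq_emod_of_pos (show (0:Int) < 3 by norm_num)]
  omega

lemma pvVm_max (d s0 w : Int) (h9 : w ≤ 9) (hc : PySem.Int.mod (s0 - d + w) 3 = 0) :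
    w ≤ pvVm d s0 := by
  unfold pvVm at *
  simp only [PySem.Int.mod_eq_emod_of_pos (show (0:Int) < 3 by norm_num)] at *
  omega

lemma pvVm_fire (d s0 : Int) (hns : PySem.Int.mod s0 3 ≠ 0)
    (h : d ≤ 7 ∨ (d = 8 ∧ PySem.Int.mod s0 3 = 2)) : d < pvVm d s0 := by
  unfold pvVm at *
  simp only [PySem.Int.mod_eq_emod_of_pos (show (0:Int) < 3 by norm_num)] at *
  omega

lemma pv_sum_set (L : List Int) (i : Nat) (a : Int) (h : i < L.length) :
    (L.set i a).sum = L.sum - L[i] + a := by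
  have h1 := List.sum_set L i a
  have h2 := List.sum_set L i L[i]
  rw [List.set_getElem_self] at h2
  simp only [if_pos h] at h1 h2
  omega

lemma mem_pvAWhile {y : List Int} : ∀ (i : Nat) (cur : List Int) (acc : List (List Int)),
    i < cur.length →
    (y ∈ pvAWhile i cur acc ↔ y ∈ acc ∨
      ∃ w, cur.getD i 0 ≤ w ∧ w < 10 ∧ PySem.Int.mod ((cur.set i w).sum) 3 = 0 ∧ y = cur.set i w) := by
  intro i cur acc
  fun_induction pvAWhile i cur acc with
  | case1 cur acc hi hv ih =>
      intro _
      simp only [PySem.List.pySetD_natCast, PySem.List.pyGetD_natCast] at hv ih ⊢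
      have hlen : i < (cur.set i (cur.getD i 0 + 1)).length := by simpa using hi
      have hd0 : (cur.set i (cur.getD i 0 + 1)).getD i 0 = cur.getD i 0 + 1 := by
        rw [List.getD_eq_getElem _ _ hlen]; exact List.getElem_set_self _
      have hself : cur.set i (cur.getD i 0) = cur := by
        rw [List.getD_eq_getElem _ _ hi]; exact List.set_getElem_self hi
      simp only [dite_eq_ite] at ih
      rw [ih hlen]
      simp only [List.set_set, hd0]
      by_cases hc : PySem.Int.mod cur.sum 3 = 0
      · simp only [if_pos hc, List.mem_append, List.mem_singleton]
        constructor
        · rintro ((hy | hy) | ⟨w, h1, h2, h3, h4⟩)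
          · exact Or.inl hy
          · exact Or.inr ⟨cur.getD i 0, le_refl _, hv, by rw [hself]; exact hc, by rw [hself, hy]⟩
          · exact Or.inr ⟨w, by omega, h2, h3, h4⟩
        · rintro (hy | ⟨w, h1, h2, h3, h4⟩)
          · exact Or.inl (Or.inl hy)
          · rcases eq_or_lt_of_le h1 with rfl | hlt
            · exact Or.inl (Or.inr (by rw [h4, hself]))
            · exact Or.inr ⟨w, by omega, h2, h3, h4⟩
      · simp only [if_neg hc]
        constructor
        · rintro (hy | ⟨w, h1, h2, h3, h4⟩)
          · exact Or.inl hy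
          · exact Or.inr ⟨w, by omega, h2, h3, h4⟩
        · rintro (hy | ⟨w, h1, h2, h3, h4⟩)
          · exact Or.inl hy
          · rcases eq_or_lt_of_le h1 with rfl | hlt
            · exact absurd (by rwa [hself] at h3) hc
            · exact Or.inr ⟨w, by omega, h2, h3, h4⟩
  | case2 cur acc hi hv =>
      intro _
      simp only [PySem.List.pyGetD_natCast] at hv
      constructor
      · exact Or.inl
      · rintro (hy | ⟨w, h1, h2, _, _⟩)
        · exact hy
        · omega
  | case3 cur acc hi =>
      intro h
      exact absurd h hi

lemma mem_foldl_pvAWhile {ds y : List Int} : ∀ (l : List Nat) (acc : List (List Int)),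
    (∀ i ∈ l, i < ds.length) →
    (y ∈ l.foldl (fun acc i => pvAWhile i ds acc) acc ↔ y ∈ acc ∨
      ∃ i ∈ l, ∃ w, ds.getD i 0 ≤ w ∧ w < 10 ∧
        PySem.Int.mod ((ds.set i w).sum) 3 = 0 ∧ y = ds.set i w) := by
  intro l
  induction l with
  | nil => intro acc _; simp
  | cons j t ih =>
      intro acc hl
      simp only [List.foldl_cons]
      rw [ih _ (fun i hi => hl i (List.mem_cons_of_mem _ hi)),
        mem_pvAWhile j ds acc (hl j List.mem_cons_self)]
      simp only [List.mem_cons]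
      constructor
      · rintro ((hy | ⟨w, hw⟩) | ⟨i, hi, w, hw⟩)
        · exact Or.inl hy
        · exact Or.inr ⟨j, Or.inl rfl, w, hw⟩
        · exact Or.inr ⟨i, Or.inr hi, w, hw⟩
      · rintro (hy | ⟨i, (rfl | hi), w, hw⟩)
        · exact Or.inl (Or.inl hy)
        · exact Or.inl (Or.inr ⟨w, hw⟩)
        · exact Or.inr ⟨i, hi, w, hw⟩

lemma mem_newArray {ds y : List Int} :
    (y ∈ (List.range ds.length).foldl (fun acc i => pvAWhile i ds acc) []) ↔
      ∃ i : Nat, i < ds.length ∧ ∃ w, ds.getD i 0 ≤ w ∧ w < 10 ∧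
        PySem.Int.mod ((ds.set i w).sum) 3 = 0 ∧ y = ds.set i w := by
  rw [mem_foldl_pvAWhile (List.range ds.length) [] (fun i hi => List.mem_range.mp hi)]
  simp only [List.not_mem_nil, false_or, List.mem_range]

lemma pvBLoop_nil (ds0 : List Int) (s0 : Int) : pvBLoop ds0 s0 [] = none := rfl

lemma pvBLoop_cons (ds0 : List Int) (s0 i d : Int) (rest : List (Int × Int)) :
    pvBLoop ds0 s0 ((i, d) :: rest) =
      if d < pvVm d s0 then
        some (PySem.List.slice ds0 none (some i) ++ [pvVm d s0] ++ PySem.List.slice ds0 (some (i + 1)) none)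
      else pvBLoop ds0 s0 rest := rfl

lemma pvBLoop_none {ds0 : List Int} {s0 : Int} : ∀ (l : List (Int × Int)),
    pvBLoop ds0 s0 l = none ↔ ∀ p ∈ l, ¬ p.2 < pvVm p.2 s0 := by
  intro l
  induction l with
  | nil => simp [pvBLoop_nil]
  | cons p rest ih =>
      obtain ⟨i, d⟩ := p
      rw [pvBLoop_cons]
      by_cases hf : d < pvVm d s0
      · simp [hf]
      · rw [if_neg hf, ih]
        constructor
        · rintro hall p hp
          rcases List.mem_cons.mp hp with rfl | hp'
          · simpa using hf
          · exact hall p hp'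
        · intro hall p hp
          exact hall p (List.mem_cons_of_mem _ hp)

lemma pvBLoop_enum_some {ds0 : List Int} {s0 : Int} : ∀ (ds : List Int) (k : Int) (best : List Int),
    pvBLoop ds0 s0 (PySem.List.enumerate ds k) = some best →
    ∃ t : Nat, t < ds.length ∧ (∀ u : Nat, u < t → ¬ (ds.getD u 0 < pvVm (ds.getD u 0) s0)) ∧
      ds.getD t 0 < pvVm (ds.getD t 0) s0 ∧
      best = PySem.List.slice ds0 none (some (k + t)) ++ [pvVm (ds.getD t 0) s0] ++
        PySem.List.slice ds0 (some (k + t + 1)) none := by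
  intro ds
  induction ds with
  | nil => intro k best h; rw [PySem.List.enumerate_nil, pvBLoop_nil] at h; exact absurd h (by simp)
  | cons d rest ih =>
      intro k best h
      rw [PySem.List.enumerate_cons, pvBLoop_cons] at h
      by_cases hf : d < pvVm d s0
      · rw [if_pos hf] at h
        refine ⟨0, by simp, by omega, by simpa using hf, ?_⟩
        simp only [Option.some_inj] at h
        simpa using h.symm
      · rw [if_neg hf] at h
        obtain ⟨t, ht, hmin, hfire, hbest⟩ := ih (k + 1) best h
        refine ⟨t + 1, by simpa using ht, ?_, by simpa using hfire, ?_⟩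
        · intro u hu
          cases u with
          | zero => simpa using hf
          | succ u => simpa using hmin u (by omega)
        · rw [hbest]
          have h1 : k + 1 + (t : Int) = k + ((t : Nat) + 1 : Nat) := by push_cast; ring
          rw [h1]
          simp

lemma pv_slice_set (ds : List Int) (i : Nat) (v : Int) (h : i < ds.length) :
    PySem.List.slice ds none (some (i : Int)) ++ [v] ++ PySem.List.slice ds (some ((i : Int) + 1)) none
      = ds.set i v := by
  have hc : ((i : Int) + 1) = ((i + 1 : Nat) : Int) := by push_cast; ring
  rw [PySem.List.slice_to_natCast, hc, PySem.List.slice_from_natCast,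
    List.set_eq_take_cons_drop v h]
  simp

lemma pv_lex_lt : ∀ (i : Nat) (a b : List Int), i < a.length → i < b.length →
    (∀ k : Nat, k < i → a.getD k 0 = b.getD k 0) → a.getD i 0 < b.getD i 0 → a < b := by
  intro i
  induction i with
  | zero =>
      intro a b ha hb _ hlt
      match a, b, ha, hb with
      | x :: a', y :: b', _, _ =>
        simp only [List.getD_cons_zero] at hlt
        exact List.cons_lt_cons_iff.mpr (Or.inl hlt)
  | succ n ih =>
      intro a b ha hb hag hlt
      match a, b, ha, hb with
      | x :: a', y :: b', ha, hb =>
        have h0 : x = y := by simpa using hag 0 (Nat.succ_pos n)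
        refine List.cons_lt_cons_iff.mpr (Or.inr ⟨h0, ih a' b' (by simpa using ha) (by simpa using hb) ?_ (by simpa using hlt)⟩)
        intro k hk
        simpa using hag (k + 1) (by omega)

lemma pv_max?_eq {xs : List (List Int)} {g : List Int} (hmem : g ∈ xs)
    (hub : ∀ y ∈ xs, y ≤ g) : PySem.List.max? xs (fun x => x) = some g := by
  cases h : PySem.List.max? xs (fun x => x) with
  | none => exact absurd ((PySem.List.max?_eq_none_iff xs _).mp h ▸ hmem) (List.not_mem_nil)
  | some m =>
      have hD : (fun (a b : List ℤ) => a.decidableLT b) = (LinearOrder.toDecidableLT : DecidableLT (List ℤ)) := by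
        funext a b; exact Subsingleton.elim _ _
      have h' : (@PySem.List.max? (List ℤ) (List ℤ) List.instLinearOrder.toLT LinearOrder.toDecidableLT xs fun x => x) = some m := by
        rw [← hD]; exact h
      have h1 : m ≤ g := hub m (PySem.List.max?_mem h)
      have h2 : g ≤ m := PySem.List.max?_isMax h' g hmem
      rw [le_antisymm h1 h2]

lemma pv_mem_toDigitsCore (b : Nat) (hb : 0 < b) : ∀ (f n : Nat) (acc : List Char),
    ∀ c ∈ Nat.toDigitsCore b f n acc, c ∈ acc ∨ ∃ m : Nat, m < b ∧ c = Nat.digitChar m := by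
  intro f
  induction f with
  | zero => intro n acc c hc; exact Or.inl hc
  | succ f ih =>
      intro n acc c hc
      rw [Nat.toDigitsCore] at hc
      by_cases hz : n / b = 0
      · simp only [hz] at hc
        rcases List.mem_cons.mp hc with h | h
        · exact Or.inr ⟨n % b, Nat.mod_lt _ hb, h⟩
        · exact Or.inl h
      · simp only [if_neg hz] at hc
        rcases ih (n / b) (_ :: acc) c hc with h | h
        · rcases List.mem_cons.mp h with h' | h'
          · exact Or.inr ⟨n % b, Nat.mod_lt _ hb, h'⟩
          · exact Or.inl h'
        · exact Or.inr h

lemma pv_toDigitsCore_ne (b : Nat) : ∀ (f n : Nat) (acc : List Char),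
    (0 < f ∨ acc ≠ []) → Nat.toDigitsCore b f n acc ≠ [] := by
  intro f
  induction f with
  | zero =>
      intro n acc h
      rcases h with h | h
      · omega
      · simpa [Nat.toDigitsCore] using h
  | succ f ih =>
      intro n acc _
      rw [Nat.toDigitsCore]
      by_cases hz : n / b = 0
      · simp [hz]
      · simp only [if_neg hz]
        exact ih (n / b) _ (Or.inr (by simp))

lemma pv_digit_val (m : Nat) (h : m < 10) : PySem.Int.ofChars? [Nat.digitChar m] = some (m : Int) := by
  interval_cases m <;> decide

lemma pv_toChars_digits (num : Int) (h0 : 0 ≤ num) :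
    ∀ c ∈ PySem.Int.toChars num,
      0 ≤ (PySem.Int.ofChars? [c]).getD 0 ∧ (PySem.Int.ofChars? [c]).getD 0 ≤ 9 := by
  intro c hc
  rw [PySem.Int.toChars, if_neg (by omega)] at hc
  rcases pv_mem_toDigitsCore 10 (by norm_num) _ _ [] c hc with h | ⟨m, hm, rfl⟩
  · simp at h
  · rw [pv_digit_val m hm]
    simp only [Option.getD_some]
    omega

lemma pv_toChars_ne (num : Int) : PySem.Int.toChars num ≠ [] := by
  rw [PySem.Int.toChars]
  split
  · simp
  · exact pv_toDigitsCore_ne 10 _ _ [] (Or.inl (by omega))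

lemma pv_join_nil : ∀ parts : List (List Char), PySem.Chars.join [] parts = parts.flatten
  | [] => by rw [PySem.Chars.join_nil]; rfl
  | [p] => by rw [PySem.Chars.join_singleton]; simp
  | p :: q :: rest => by
      rw [PySem.Chars.join_cons_cons, pv_join_nil (q :: rest)]; simp

lemma pv_foldl_toList (l : List Int) : ∀ s : String,
    (l.foldl (fun s d => s ++ PySem.Int.toStr d) s).toList
      = s.toList ++ (l.map PySem.Int.toChars).flatten := by
  induction l with
  | nil => intro s; simp
  | cons d t ih =>
      intro s
      simp only [List.foldl_cons, List.map_cons, List.flatten_cons, ih,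
        String.toList_append, PySem.Int.toList_toStr, List.append_assoc]

lemma pv_join_toList (l : List Int) :
    (PySem.Str.join "" (l.map PySem.Int.toStr)).toList
      = (l.foldl (fun s d => s ++ PySem.Int.toStr d) "").toList := by
  rw [PySem.Str.toList_join, pv_foldl_toList]
  have h1 : ("" : String).toList = ([] : List Char) := by decide
  rw [h1, pv_join_nil]
  simp [Function.comp_def, PySem.Int.toList_toStr]

lemma pv_getD_set_eq (ds : List Int) (a : Nat) (v : Int) (h : a < ds.length) :
    (ds.set a v).getD a 0 = v := by
  rw [List.getD_eq_getElem _ _ (by simpa using h)]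
  exact List.getElem_set_self _

lemma pv_getD_set_ne (ds : List Int) (a : Nat) (v : Int) (k : Nat) (h : k ≠ a) :
    (ds.set a v).getD k 0 = ds.getD k 0 := by
  by_cases hk : k < ds.length
  · rw [List.getD_eq_getElem _ _ (by simpa using hk), List.getD_eq_getElem _ _ hk]
    exact List.getElem_set_ne (by omega) _
  · rw [List.getD_eq_default _ _ (by simpa using not_lt.mp hk), List.getD_eq_default _ _ (not_lt.mp hk)]

lemma pv_set_getD_self (ds : List Int) (a : Nat) (h : a < ds.length) :
    ds.set a (ds.getD a 0) = ds := by
  rw [List.getD_eq_getElem _ _ h]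
  exact List.set_getElem_self h

lemma pv_sum_set' (ds : List Int) (j : Nat) (w : Int) (h : j < ds.length) :
    (ds.set j w).sum = ds.sum - ds.getD j 0 + w := by
  rw [pv_sum_set ds j w h, List.getD_eq_getElem _ _ h]

lemma pv_getD_mem (ds : List Int) (j : Nat) (h : j < ds.length) : ds.getD j 0 ∈ ds := by
  rw [List.getD_eq_getElem _ _ h]
  exact List.getElem_mem h

lemma pv_core_some {ds best : List Int} (h9 : ∀ d ∈ ds, 0 ≤ d ∧ d ≤ 9)
    (hb : pvBLoop ds ds.sum (PySem.List.enumerate ds) = some best) :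
    PySem.List.max? ((List.range ds.length).foldl (fun acc i => pvAWhile i ds acc) [])
      (fun x => x) = some best := by
  obtain ⟨t, ht, hmin, hfire, hbest⟩ := pvBLoop_enum_some ds 0 best hb
  have hzt : ((0:Int) + (t:Int)) = (t:Int) := by ring
  rw [hzt, pv_slice_set ds t _ ht] at hbest
  have hbd := pvVm_bounds (ds.getD t 0) ds.sum
  apply pv_max?_eq
  · rw [hbest]
    exact mem_newArray.mpr ⟨t, ht, pvVm (ds.getD t 0) ds.sum, le_of_lt hfire, by omega,
      by rw [pv_sum_set' ds t _ ht]; exact hbd.2.2, rfl⟩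
  · intro y hy
    obtain ⟨j, hj, w, hw1, hw2, hw3, rfl⟩ := mem_newArray.mp hy
    have hwle : w ≤ pvVm (ds.getD j 0) ds.sum :=
      pvVm_max _ _ _ (by omega) (by rw [← pv_sum_set' ds j w hj]; exact hw3)
    rcases lt_trichotomy j t with hjt | heq | htj
    · -- position j was not increasable, so this variant is ds itself
      have hnf := hmin j hjt
      have hwd : w = ds.getD j 0 := by omega
      rw [hwd, pv_set_getD_self ds j hj, hbest]
      refine le_of_lt (pv_lex_lt t ds _ ht (by simpa using ht) ?_ ?_)
      · intro k hk; rw [pv_getD_set_ne ds t _ k (by omega)]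
      · rw [pv_getD_set_eq ds t _ ht]; exact hfire
    · -- same position: w is at most the maximal admissible value
      subst heq
      rcases eq_or_lt_of_le hwle with heqv | hlt
      · rw [heqv, hbest]
      · rw [hbest]
        refine le_of_lt (pv_lex_lt j _ _ (by simpa using ht) (by simpa using ht) ?_ ?_)
        · intro k hk
          rw [pv_getD_set_ne ds j _ k (by omega), pv_getD_set_ne ds j _ k (by omega)]
        · rw [pv_getD_set_eq ds j _ ht, pv_getD_set_eq ds j _ ht]; exact hlt
    · -- later position: it still shows the original digit at position t
      rw [hbest]
      refine le_of_lt (pv_lex_lt t _ _ (by simpa using ht) (by simpa using ht) ?_ ?_)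
      · intro k hk
        rw [pv_getD_set_ne ds j _ k (by omega), pv_getD_set_ne ds t _ k (by omega)]
      · rw [pv_getD_set_ne ds j _ t (by omega), pv_getD_set_eq ds t _ ht]; exact hfire

lemma pv_core_none {ds : List Int} (h9 : ∀ d ∈ ds, 0 ≤ d ∧ d ≤ 9) (hne : ds ≠ [])
    (hs0 : PySem.Int.mod ds.sum 3 = 0)
    (hb : pvBLoop ds ds.sum (PySem.List.enumerate ds) = none) :
    PySem.List.max? ((List.range ds.length).foldl (fun acc i => pvAWhile i ds acc) [])
      (fun x => x) = some ds := by
  have hall := (pvBLoop_none _).mp hb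
  have halld : ∀ d ∈ ds, ¬ d < pvVm d ds.sum := by
    intro d hd
    rw [← PySem.List.map_snd_enumerate ds 0] at hd
    obtain ⟨p, hp, hpd⟩ := List.mem_map.mp hd
    exact hpd ▸ hall p hp
  have h0 : 0 < ds.length := List.length_pos_iff.mpr hne
  apply pv_max?_eq
  · refine mem_newArray.mpr ⟨0, h0, ds.getD 0 0, le_refl _, ?_,
      by rw [pv_set_getD_self ds 0 h0]; exact hs0, (pv_set_getD_self ds 0 h0).symm⟩
    have := (h9 _ (pv_getD_mem ds 0 h0)).2
    omega
  · intro y hy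
    obtain ⟨j, hj, w, hw1, hw2, hw3, rfl⟩ := mem_newArray.mp hy
    have hnf := halld (ds.getD j 0) (pv_getD_mem ds j hj)
    have hwle : w ≤ pvVm (ds.getD j 0) ds.sum :=
      pvVm_max _ _ _ (by omega) (by rw [← pv_sum_set' ds j w hj]; exact hw3)
    have hwd : w = ds.getD j 0 := by omega
    rw [hwd, pv_set_getD_self ds j hj]

theorem pv_main (num : Int) (hpre : Pre_max_division_by_3 num) :
    max_division_by_3 num = max_division_by_3_alt num := by
  obtain ⟨h0, hpre2⟩ := hpre
  unfold max_division_by_3 max_division_by_3_alt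
  simp only [PySem.Int.toList_toStr]
  set ds : List Int := (PySem.Int.toChars num).map (fun a => (PySem.Int.ofChars? [a]).getD 0) with hds
  have h9 : ∀ d ∈ ds, 0 ≤ d ∧ d ≤ 9 := by
    rw [hds]; intro d hd
    obtain ⟨c, hc, rfl⟩ := List.mem_map.mp hd
    exact pv_toChars_digits num h0 c hc
  have hne : ds ≠ [] := by
    rw [hds]; intro h
    exact pv_toChars_ne num (List.map_eq_nil_iff.mp h)
  cases hb : pvBLoop ds ds.sum (PySem.List.enumerate ds) with
  | some best =>
      rw [pv_core_some h9 hb]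
      show (PySem.Int.ofStr? (best.foldl (fun s d => s ++ PySem.Int.toStr d) "")).getD 0
          = (PySem.Int.ofStr? (PySem.Str.join "" (best.map PySem.Int.toStr))).getD 0
      simp only [PySem.Int.ofStr?]
      rw [pv_join_toList]
  | none =>
      have hs0 : PySem.Int.mod ds.sum 3 = 0 := by
        by_contra hns
        have hall := (pvBLoop_none _).mp hb
        rcases hpre2 with h | ⟨d, hd, hcase⟩
        · exact hns h
        · rw [← PySem.List.map_snd_enumerate ds 0] at hd
          obtain ⟨p, hp, hpd⟩ := List.mem_map.mp hd
          exact (hall p hp) (hpd ▸ pvVm_fire d ds.sum hns hcase)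
      rw [pv_core_none h9 hne hs0 hb]
      show (PySem.Int.ofStr? (ds.foldl (fun s d => s ++ PySem.Int.toStr d) "")).getD 0
          = if PySem.Int.mod ds.sum 3 = 0 then
              (PySem.Int.ofStr? (PySem.Str.join "" (ds.map PySem.Int.toStr))).getD 0
            else 0
      rw [if_pos hs0]
      simp only [PySem.Int.ofStr?]
      rw [pv_join_toList]

-- ===== VERDICT (by name: the statement is the Claim_ definition above) =====
theorem max_division_by_3_spec : Claim_equal_max_division_by_3 := by
  intro num _ hpre
  show max_division_by_3 num = max_division_by_3_alt num
  exact pv_main num hpre
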